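-- pv_equiv track=rewrite | github.com/Mystic-Mirage/python-mayadate-obsolete | mayadate.py | _ord2longcount
-- ===== SOURCE A (Python) =====
-- _MAXORDINAL = 57599999
--
-- def _ord2longcount(o):
--     assert 0 <= o <= _MAXORDINAL, 'ordinal must be in 1..%d' % (_MAXORDINAL)
--     d = o
--     l = []
--     for r in (2880000, 144000, 7200, 360, 20, 1):
--         q, d = divmod(d, r)
--         l.append(q)
--     return tuple(l)
-- ===== SOURCE B (Python) =====
-- def _ord2longcount(o):
--     assert 0 <= o <= 57599999, 'ordinal must be in 1..%d' % 57599999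
--     return (o // 2880000,
--             o // 144000 % 20,
--             o // 7200 % 20,
--             o // 360 % 20,
--             o // 20 % 18,
--             o % 20)
-- ===== Notes on version B (the rewrite author's own statement) =====
-- stated objective: simpler
-- what changed: B has no loop or mutable state: each long-count digit is an independent closed-form expression (o // place % radix), replacing A's stateful fold that threads the running remainder through successive divmods.
import Mathlib
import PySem

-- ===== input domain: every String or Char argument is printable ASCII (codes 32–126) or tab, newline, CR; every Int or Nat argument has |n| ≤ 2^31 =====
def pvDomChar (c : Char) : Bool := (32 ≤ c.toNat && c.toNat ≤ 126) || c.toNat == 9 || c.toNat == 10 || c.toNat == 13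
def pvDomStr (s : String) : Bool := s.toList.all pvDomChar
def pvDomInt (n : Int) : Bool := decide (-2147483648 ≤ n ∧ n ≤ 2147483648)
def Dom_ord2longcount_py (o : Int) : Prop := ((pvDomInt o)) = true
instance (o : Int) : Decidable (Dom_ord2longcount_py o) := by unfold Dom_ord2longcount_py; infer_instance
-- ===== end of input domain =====

-- B replaces A's stateful fold over place values by six independent closed-form digit
-- expressions (o // place % radix); objective: simpler. Pre_ excludes inputs where A's assert raises.

-- ===== PORT A =====
-- fold over the tuple of place values, state = (d, accumulated quotients)
def ord2longcount_py (o : Int) : List Int :=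
  let step := fun (st : Int × List Int) (r : Int) =>
    let q := PySem.Int.floordiv st.1 r
    let d := PySem.Int.mod st.1 r
    (d, st.2 ++ [q])
  (([ (2880000 : Int), 144000, 7200, 360, 20, 1 ].foldl step (o, []))).2

-- ===== PORT B =====
-- six independent closed-form digit expressions, no loop and no threaded state
def ord2longcount_py_alt (o : Int) : List Int :=
  [ PySem.Int.floordiv o 2880000,
    PySem.Int.mod (PySem.Int.floordiv o 144000) 20,
    PySem.Int.mod (PySem.Int.floordiv o 7200) 20,
    PySem.Int.mod (PySem.Int.floordiv o 360) 20,
    PySem.Int.mod (PySem.Int.floordiv o 20) 18,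
    PySem.Int.mod o 20 ]

-- ===== PRECONDITION & SPEC =====
-- A's assert raises AssertionError outside 0 ≤ o ≤ 57599999
def Pre_ord2longcount_py (o : Int) : Prop := 0 ≤ o ∧ o ≤ 57599999
instance (o : Int) : Decidable (Pre_ord2longcount_py o) := by unfold Pre_ord2longcount_py; infer_instance
def pvWitness_ord2longcount_py : Int := (1234567)

def Spec_ord2longcount_py (o : Int) (out : List Int) : Prop := out = ord2longcount_py_alt o
instance (o : Int) (out : List Int) : Decidable (Spec_ord2longcount_py o out) := by unfold Spec_ord2longcount_py; infer_instance

-- ===== CLAIM (what is proved, stated in full; the proofs are below) =====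
def Claim_equal_ord2longcount_py : Prop := ∀ (o : Int), Dom_ord2longcount_py o → Pre_ord2longcount_py o → Spec_ord2longcount_py o (ord2longcount_py o)

-- ===== LEMMAS AND PROOFS =====

-- ===== VERDICT (by name: the statement is the Claim_ definition above) =====
theorem ord2longcount_py_spec : Claim_equal_ord2longcount_py := by
  intro o _ hpre
  obtain ⟨h0, h1⟩ := hpre
  unfold Spec_ord2longcount_py ord2longcount_py ord2longcount_py_alt
  simp only [List.foldl, List.nil_append, List.cons_append]
  norm_num [PySem.Int.floordiv_eq_ediv_of_pos, PySem.Int.mod_eq_emod_of_pos,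
    List.cons.injEq]
  omega
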